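-- pv_equiv track=rewrite | github.com/sharbongomes2003/FREE-FIRE-OFFSET-FINDING-WITH-PITCH- | free fire offset find.py | _generate_float_value
-- ===== SOURCE A (Python) =====
-- def _generate_float_value(string_line):
--     """Generate float/bool value"""
--     string_lower = string_line.lower()
--
--     if any(word in string_lower for word in ['true', 'enable', 'can', 'active']):
--         return "true"
--     elif any(word in string_lower for word in ['false', 'disable', 'cannot']):
--         return "false"
--     elif 'float' in string_lower or 'double' in string_lower:
--         return "1.0"
--     elif 'int' in string_lower:
--         return "1"
--     else:
--         return "true"
-- ===== SOURCE B (Python) =====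
-- _KEYCAT = [('true', 0), ('enable', 0), ('can', 0), ('active', 0),
--            ('false', 1), ('disable', 1), ('cannot', 1),
--            ('float', 2), ('double', 2), ('int', 3)]
-- _RESULTS = ["true", "false", "1.0", "1", "true"]
--
-- def _generate_float_value(string_line):
--     """Generate float/bool value"""
--     s = string_line.lower()
--     best = 4  # no keyword seen yet -> default slot
--     for i in range(len(s)):
--         for kw, cat in _KEYCAT:
--             if cat < best and s.startswith(kw, i):
--                 best = cat
--     return _RESULTS[best]
-- ===== Notes on version B (the rewrite author's own statement) =====
-- stated objective: alternative
-- what changed: Instead of running a separate substring search per keyword through an if/elif chain, B makes a single left-to-right positional scan of the lowered line, checking at each position which keywords start there and keeping the lowest (highest-priority) category seen in an accumulator, then maps that category through a result table.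
import Mathlib
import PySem

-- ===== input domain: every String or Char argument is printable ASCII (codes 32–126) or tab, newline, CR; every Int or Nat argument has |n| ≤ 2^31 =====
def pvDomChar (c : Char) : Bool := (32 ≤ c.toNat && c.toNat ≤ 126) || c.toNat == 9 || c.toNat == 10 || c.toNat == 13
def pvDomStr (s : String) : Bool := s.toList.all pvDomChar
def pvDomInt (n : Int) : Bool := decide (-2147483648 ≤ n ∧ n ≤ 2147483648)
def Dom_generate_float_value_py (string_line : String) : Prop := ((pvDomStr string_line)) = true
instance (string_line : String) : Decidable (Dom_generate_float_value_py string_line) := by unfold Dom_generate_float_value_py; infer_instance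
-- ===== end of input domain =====

-- B replaces A's per-keyword substring searches by a single left-to-right positional scan of the
-- lowered line that keeps the best (lowest) matched category in an accumulator (alternative algorithm).

-- ===== PORT A =====
def generate_float_value_py (string_line : String) : String :=
  let string_lower := PySem.Str.lower string_line
  if (["true", "enable", "can", "active"].any (fun word => PySem.Str.isIn word string_lower)) then
    "true"
  else if (["false", "disable", "cannot"].any (fun word => PySem.Str.isIn word string_lower)) then
    "false"
  else if PySem.Str.isIn "float" string_lower || PySem.Str.isIn "double" string_lower then
    "1.0"
  else if PySem.Str.isIn "int" string_lower then
    "1"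
  else
    "true"

-- ===== PORT B =====
def pvKeyCat : List (List Char × Nat) :=
  [ ("true".toList, 0), ("enable".toList, 0), ("can".toList, 0), ("active".toList, 0),
    ("false".toList, 1), ("disable".toList, 1), ("cannot".toList, 1),
    ("float".toList, 2), ("double".toList, 2), ("int".toList, 3) ]

def pvResults : List String := ["true", "false", "1.0", "1", "true"]

-- the two nested for-loops of Source B: position i ↦ the tail at i; s.startswith(kw, i) ↦ startswith on that tail
def pvScan : List Char → Nat → Nat
  | [], best => best
  | t@(_ :: rest), best =>
      pvScan rest
        (pvKeyCat.foldl
          (fun b p => if p.2 < b && PySem.Chars.startswith t p.1 then p.2 else b) best)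

def generate_float_value_py_alt (string_line : String) : String :=
  let s := PySem.Str.lower string_line
  -- _RESULTS[best]: best is always in [0,4], so plain indexing with default (never taken)
  pvResults.getD (pvScan s.toList 4) "true"

-- ===== PRECONDITION & SPEC =====
def Spec_generate_float_value_py (string_line : String) (out : String) : Prop := out = generate_float_value_py_alt string_line
instance (string_line : String) (out : String) : Decidable (Spec_generate_float_value_py string_line out) := by unfold Spec_generate_float_value_py; infer_instance

-- ===== CLAIM =====
def Claim_equal_generate_float_value_py : Prop := ∀ (string_line : String), Dom_generate_float_value_py string_line → Spec_generate_float_value_py string_line (generate_float_value_py string_line)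

-- ===== LEMMAS AND PROOFS =====

lemma pvStep_le_iff (t : List Char) (c : Nat) :
    ∀ (kcs : List (List Char × Nat)) (b : Nat),
      (kcs.foldl (fun b p => if p.2 < b && PySem.Chars.startswith t p.1 then p.2 else b) b) ≤ c ↔
      b ≤ c ∨ ∃ p ∈ kcs, p.2 ≤ c ∧ p.1 <+: t := by
  intro kcs
  induction kcs with
  | nil => simp
  | cons p kcs ih =>
    intro b
    have hf : (if p.2 < b && PySem.Chars.startswith t p.1 then p.2 else b) ≤ c ↔
        b ≤ c ∨ (p.2 ≤ c ∧ p.1 <+: t) := by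
      cases hs : PySem.Chars.startswith t p.1 with
      | false =>
        have hnp : ¬ p.1 <+: t := by
          intro h; rw [← PySem.Chars.startswith_iff] at h; simp [hs] at h
        simp only [Bool.and_false, Bool.false_eq_true, if_false]
        tauto
      | true =>
        have hp : p.1 <+: t := (PySem.Chars.startswith_iff t p.1).mp hs
        simp only [Bool.and_true, decide_eq_true_eq]
        split_ifs with hlt
        · constructor
          · exact fun h => Or.inr ⟨h, hp⟩
          · rintro (h | ⟨h, -⟩)
            · omega
            · exact h
        · constructor
          · exact Or.inl
          · rintro (h | ⟨h, -⟩)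
            · exact h
            · omega
    rw [List.foldl_cons, ih, hf]
    simp only [List.mem_cons]
    constructor
    · rintro ((h | ⟨h1, h2⟩) | ⟨q, hq, h3, h4⟩)
      · exact Or.inl h
      · exact Or.inr ⟨p, Or.inl rfl, h1, h2⟩
      · exact Or.inr ⟨q, Or.inr hq, h3, h4⟩
    · rintro (h | ⟨q, (rfl | hq), h3, h4⟩)
      · exact Or.inl (Or.inl h)
      · exact Or.inl (Or.inr ⟨h3, h4⟩)
      · exact Or.inr ⟨q, hq, h3, h4⟩

lemma pvScan_le_iff (c : Nat) :
    ∀ (l : List Char) (b : Nat),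
      pvScan l b ≤ c ↔ b ≤ c ∨ ∃ p ∈ pvKeyCat, p.2 ≤ c ∧ p.1 <:+: l := by
  intro l
  induction l with
  | nil =>
    intro b
    simp only [pvScan, List.infix_nil]
    constructor
    · exact Or.inl
    · rintro (h | ⟨q, hq, _, hnil⟩)
      · exact h
      · exfalso; revert hnil; fin_cases hq <;> decide
  | cons ch rest ih =>
    intro b
    rw [pvScan, ih, pvStep_le_iff]
    constructor
    · rintro ((h | ⟨q, hq, hqc, hqp⟩) | ⟨q, hq, hqc, hqi⟩)
      · exact Or.inl h
      · exact Or.inr ⟨q, hq, hqc, hqp.isInfix⟩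
      · exact Or.inr ⟨q, hq, hqc, List.infix_cons hqi⟩
    · rintro (h | ⟨q, hq, hqc, hqi⟩)
      · exact Or.inl (Or.inl h)
      · rcases List.infix_cons_iff.mp hqi with hpre | hinf
        · exact Or.inl (Or.inr ⟨q, hq, hqc, hpre⟩)
        · exact Or.inr ⟨q, hq, hqc, hinf⟩

-- the scanner's result is ≤ c iff some keyword of category ≤ c occurs in the line (c < 4)
lemma pvScan_le_iff' (l : List Char) (c : Nat) (hc : c < 4) :
    pvScan l 4 ≤ c ↔ ∃ p ∈ pvKeyCat, p.2 ≤ c ∧ p.1 <:+: l := by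
  rw [pvScan_le_iff]
  constructor
  · rintro (h | h)
    · omega
    · exact h
  · exact Or.inr

lemma pvScan_le_four (l : List Char) : pvScan l 4 ≤ 4 := by
  rw [pvScan_le_iff]; exact Or.inl le_rfl

-- ===== VERDICT =====
theorem generate_float_value_py_spec : Claim_equal_generate_float_value_py := by
  intro s _
  unfold Spec_generate_float_value_py generate_float_value_py generate_float_value_py_alt
  set L := (PySem.Str.lower s).toList with hL
  have h0 : pvScan L 4 ≤ 0 ↔
      ((["true", "enable", "can", "active"].any
        (fun word => PySem.Str.isIn word (PySem.Str.lower s))) = true) := by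
    rw [pvScan_le_iff' _ _ (by omega)]
    simp only [List.any_eq_true, PySem.Str.isIn_iff_infix, pvKeyCat,
      List.mem_cons, List.not_mem_nil, or_false, ← hL]
    constructor
    · rintro ⟨q, hq, hqc, hqi⟩
      rcases hq with rfl | rfl | rfl | rfl | rfl | rfl | rfl | rfl | rfl | rfl
      · exact ⟨"true", by simp, hqi⟩
      · exact ⟨"enable", by simp, hqi⟩
      · exact ⟨"can", by simp, hqi⟩
      · exact ⟨"active", by simp, hqi⟩
      · exact absurd hqc (by decide)
      · exact absurd hqc (by decide)
      · exact absurd hqc (by decide)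
      · exact absurd hqc (by decide)
      · exact absurd hqc (by decide)
      · exact absurd hqc (by decide)
    · rintro ⟨w, hw, hwi⟩
      rcases hw with rfl | rfl | rfl | rfl
      · exact ⟨("true".toList, 0), by simp, by omega, hwi⟩
      · exact ⟨("enable".toList, 0), by simp, by omega, hwi⟩
      · exact ⟨("can".toList, 0), by simp, by omega, hwi⟩
      · exact ⟨("active".toList, 0), by simp, by omega, hwi⟩
  have h1 : pvScan L 4 ≤ 1 ↔
      ((["true", "enable", "can", "active"].any
        (fun word => PySem.Str.isIn word (PySem.Str.lower s))) = true ∨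
       (["false", "disable", "cannot"].any
        (fun word => PySem.Str.isIn word (PySem.Str.lower s))) = true) := by
    rw [pvScan_le_iff' _ _ (by omega)]
    simp only [List.any_eq_true, PySem.Str.isIn_iff_infix, pvKeyCat,
      List.mem_cons, List.not_mem_nil, or_false, ← hL]
    constructor
    · rintro ⟨q, hq, hqc, hqi⟩
      rcases hq with rfl | rfl | rfl | rfl | rfl | rfl | rfl | rfl | rfl | rfl
      · exact Or.inl (⟨"true", by simp, hqi⟩)
      · exact Or.inl (⟨"enable", by simp, hqi⟩)
      · exact Or.inl (⟨"can", by simp, hqi⟩)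
      · exact Or.inl (⟨"active", by simp, hqi⟩)
      · exact Or.inr (⟨"false", by simp, hqi⟩)
      · exact Or.inr (⟨"disable", by simp, hqi⟩)
      · exact Or.inr (⟨"cannot", by simp, hqi⟩)
      · exact absurd hqc (by decide)
      · exact absurd hqc (by decide)
      · exact absurd hqc (by decide)
    · rintro (⟨w, hw, hwi⟩ | ⟨w, hw, hwi⟩)
      · rcases hw with rfl | rfl | rfl | rfl
        · exact ⟨("true".toList, 0), by simp, by omega, hwi⟩
        · exact ⟨("enable".toList, 0), by simp, by omega, hwi⟩
        · exact ⟨("can".toList, 0), by simp, by omega, hwi⟩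
        · exact ⟨("active".toList, 0), by simp, by omega, hwi⟩
      · rcases hw with rfl | rfl | rfl
        · exact ⟨("false".toList, 1), by simp, by omega, hwi⟩
        · exact ⟨("disable".toList, 1), by simp, by omega, hwi⟩
        · exact ⟨("cannot".toList, 1), by simp, by omega, hwi⟩
  have h2 : pvScan L 4 ≤ 2 ↔
      ((["true", "enable", "can", "active"].any
        (fun word => PySem.Str.isIn word (PySem.Str.lower s))) = true ∨
       (["false", "disable", "cannot"].any
        (fun word => PySem.Str.isIn word (PySem.Str.lower s))) = true ∨
       PySem.Str.isIn "float" (PySem.Str.lower s) = true ∨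
       PySem.Str.isIn "double" (PySem.Str.lower s) = true) := by
    rw [pvScan_le_iff' _ _ (by omega)]
    simp only [List.any_eq_true, PySem.Str.isIn_iff_infix, pvKeyCat,
      List.mem_cons, List.not_mem_nil, or_false, ← hL]
    constructor
    · rintro ⟨q, hq, hqc, hqi⟩
      rcases hq with rfl | rfl | rfl | rfl | rfl | rfl | rfl | rfl | rfl | rfl
      · exact Or.inl (⟨"true", by simp, hqi⟩)
      · exact Or.inl (⟨"enable", by simp, hqi⟩)
      · exact Or.inl (⟨"can", by simp, hqi⟩)
      · exact Or.inl (⟨"active", by simp, hqi⟩)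
      · exact Or.inr (Or.inl (⟨"false", by simp, hqi⟩))
      · exact Or.inr (Or.inl (⟨"disable", by simp, hqi⟩))
      · exact Or.inr (Or.inl (⟨"cannot", by simp, hqi⟩))
      · exact Or.inr (Or.inr (Or.inl (hqi)))
      · exact Or.inr (Or.inr (Or.inr (hqi)))
      · exact absurd hqc (by decide)
    · rintro (⟨w, hw, hwi⟩ | ⟨w, hw, hwi⟩ | hwi | hwi)
      · rcases hw with rfl | rfl | rfl | rfl
        · exact ⟨("true".toList, 0), by simp, by omega, hwi⟩
        · exact ⟨("enable".toList, 0), by simp, by omega, hwi⟩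
        · exact ⟨("can".toList, 0), by simp, by omega, hwi⟩
        · exact ⟨("active".toList, 0), by simp, by omega, hwi⟩
      · rcases hw with rfl | rfl | rfl
        · exact ⟨("false".toList, 1), by simp, by omega, hwi⟩
        · exact ⟨("disable".toList, 1), by simp, by omega, hwi⟩
        · exact ⟨("cannot".toList, 1), by simp, by omega, hwi⟩
      · exact ⟨("float".toList, 2), by simp, by omega, hwi⟩
      · exact ⟨("double".toList, 2), by simp, by omega, hwi⟩
  have h3 : pvScan L 4 ≤ 3 ↔
      ((["true", "enable", "can", "active"].any
        (fun word => PySem.Str.isIn word (PySem.Str.lower s))) = true ∨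
       (["false", "disable", "cannot"].any
        (fun word => PySem.Str.isIn word (PySem.Str.lower s))) = true ∨
       PySem.Str.isIn "float" (PySem.Str.lower s) = true ∨
       PySem.Str.isIn "double" (PySem.Str.lower s) = true ∨
       PySem.Str.isIn "int" (PySem.Str.lower s) = true) := by
    rw [pvScan_le_iff' _ _ (by omega)]
    simp only [List.any_eq_true, PySem.Str.isIn_iff_infix, pvKeyCat,
      List.mem_cons, List.not_mem_nil, or_false, ← hL]
    constructor
    · rintro ⟨q, hq, hqc, hqi⟩
      rcases hq with rfl | rfl | rfl | rfl | rfl | rfl | rfl | rfl | rfl | rfl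
      · exact Or.inl (⟨"true", by simp, hqi⟩)
      · exact Or.inl (⟨"enable", by simp, hqi⟩)
      · exact Or.inl (⟨"can", by simp, hqi⟩)
      · exact Or.inl (⟨"active", by simp, hqi⟩)
      · exact Or.inr (Or.inl (⟨"false", by simp, hqi⟩))
      · exact Or.inr (Or.inl (⟨"disable", by simp, hqi⟩))
      · exact Or.inr (Or.inl (⟨"cannot", by simp, hqi⟩))
      · exact Or.inr (Or.inr (Or.inl (hqi)))
      · exact Or.inr (Or.inr (Or.inr (Or.inl (hqi))))
      · exact Or.inr (Or.inr (Or.inr (Or.inr (hqi))))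
    · rintro (⟨w, hw, hwi⟩ | ⟨w, hw, hwi⟩ | hwi | hwi | hwi)
      · rcases hw with rfl | rfl | rfl | rfl
        · exact ⟨("true".toList, 0), by simp, by omega, hwi⟩
        · exact ⟨("enable".toList, 0), by simp, by omega, hwi⟩
        · exact ⟨("can".toList, 0), by simp, by omega, hwi⟩
        · exact ⟨("active".toList, 0), by simp, by omega, hwi⟩
      · rcases hw with rfl | rfl | rfl
        · exact ⟨("false".toList, 1), by simp, by omega, hwi⟩
        · exact ⟨("disable".toList, 1), by simp, by omega, hwi⟩
        · exact ⟨("cannot".toList, 1), by simp, by omega, hwi⟩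
      · exact ⟨("float".toList, 2), by simp, by omega, hwi⟩
      · exact ⟨("double".toList, 2), by simp, by omega, hwi⟩
      · exact ⟨("int".toList, 3), by simp, by omega, hwi⟩
  simp only
  split_ifs with c1 c2 c3 c4
  · have h : pvScan L 4 = 0 := Nat.le_zero.mp (h0.mpr c1)
    rw [h]; rfl
  · have hle : pvScan L 4 ≤ 1 := h1.mpr (Or.inr c2)
    have hne : pvScan L 4 ≠ 0 := fun h => c1 (h0.mp (by omega))
    have h : pvScan L 4 = 1 := by omega
    rw [h]; rfl
  · rw [Bool.or_eq_true] at c3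
    have hle : pvScan L 4 ≤ 2 := h2.mpr (Or.inr (Or.inr c3))
    have hne1 : ¬ pvScan L 4 ≤ 1 := fun h => (h1.mp h).elim c1 c2
    have h : pvScan L 4 = 2 := by omega
    rw [h]; rfl
  · rw [Bool.or_eq_true] at c3
    have hle : pvScan L 4 ≤ 3 := h3.mpr (Or.inr (Or.inr (Or.inr (Or.inr c4))))
    have hne2 : ¬ pvScan L 4 ≤ 2 := fun h =>
      (h2.mp h).elim c1 (fun h' => h'.elim c2
        (fun h'' => h''.elim (fun hf => c3 (Or.inl hf)) (fun hd => c3 (Or.inr hd))))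
    have h : pvScan L 4 = 3 := by omega
    rw [h]; rfl
  · rw [Bool.or_eq_true] at c3
    have hne3 : ¬ pvScan L 4 ≤ 3 := fun h =>
      (h3.mp h).elim c1 (fun h' => h'.elim c2
        (fun h'' => h''.elim (fun hf => c3 (Or.inl hf))
          (fun h3' => h3'.elim (fun hd => c3 (Or.inr hd)) c4)))
    have h : pvScan L 4 = 4 := by have := pvScan_le_four L; omega
    rw [h]; rfl
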